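-- pv_equiv track=rewrite | github.com/vlam94/adventofcode22 | d5-s.py | getinst
-- ===== SOURCE A (Python) =====
-- def getinst(txt):
--     inst=[0]*3
--     i=0
--     j=False
--     for l in txt:
--         if l.isnumeric():
--             if not j:
--                 inst[i]=int(l)
--                 j=True
--                 continue
--             else:
--                 inst[i]=inst[i]*10+int(l)
--                 j=False
--                 i+=1
--         if j:
--             j=False
--             i+=1
--     return inst
-- ===== SOURCE B (Python) =====
-- def _chunkvals(run):
--     if not run:
--         return []
--     return [int(run[:2])] + _chunkvals(run[2:])
--
--
-- def getinst(txt):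
--     # Collect the maximal runs of numeric characters, then split each run
--     # into 2-character chunks and take the first three values (zero-padded).
--     runs = []
--     cur = ""
--     for c in txt:
--         if c.isnumeric():
--             cur += c
--         elif cur:
--             runs.append(cur)
--             cur = ""
--     if cur:
--         runs.append(cur)
--     nums = [v for run in runs for v in _chunkvals(run)]
--     return (nums + [0, 0, 0])[:3]
-- ===== Notes on version B (the rewrite author's own statement) =====
-- stated objective: alternative
-- what changed: Replaced A's char-by-char toggle-flag state machine (in-place writes into inst guided by flags i,j) by a two-level pass: collect the maximal numeric runs, split each run into 2-character chunks with a recursive helper, and zero-pad the first three values.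
import Mathlib
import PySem

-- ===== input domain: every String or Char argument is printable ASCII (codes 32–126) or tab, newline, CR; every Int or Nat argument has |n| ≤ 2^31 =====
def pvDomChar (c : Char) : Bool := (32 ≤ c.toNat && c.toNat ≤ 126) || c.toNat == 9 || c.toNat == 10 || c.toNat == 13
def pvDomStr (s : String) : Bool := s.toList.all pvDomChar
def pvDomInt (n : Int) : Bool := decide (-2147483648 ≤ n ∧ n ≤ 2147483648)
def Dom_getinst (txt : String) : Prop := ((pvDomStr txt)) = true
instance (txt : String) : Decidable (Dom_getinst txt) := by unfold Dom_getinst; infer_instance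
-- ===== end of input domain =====

-- B replaces A's char-by-char toggle-flag state machine by "collect numeric runs,
-- chunk each run into 2-char values, pad to three slots" (objective: simpler decomposition).

-- ===== PORT A =====
-- int(l) on one numeric char: exact for ASCII digits (Dom admits only ASCII)
def pvDigit (c : Char) : Int := (c.toNat : Int) - 48

-- one iteration of A's for-loop; state = (inst, i, j).
-- inst[i] = … ported via List.set / getD: under Pre_ the index is in range
-- (out of range Python raises IndexError, excluded by Pre_).  In the digit/j
-- branch the trailing `if j:` check is vacuous (j was just set False).
def pvStepA (st : List Int × Nat × Bool) (l : Char) : List Int × Nat × Bool :=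
  if PySem.Chars.isdigit l then
    if !st.2.2 then (st.1.set st.2.1 (pvDigit l), st.2.1, true)
    else (st.1.set st.2.1 (st.1.getD st.2.1 0 * 10 + pvDigit l), st.2.1 + 1, false)
  else if st.2.2 then (st.1, st.2.1 + 1, false) else st

def getinst (txt : String) : List Int :=
  (txt.toList.foldl pvStepA ([0, 0, 0], 0, false)).1

-- ===== PORT B =====
-- int(s) for a nonempty string of ASCII digits (exact on Dom; B only calls it on digit runs)
def pvIntOfDigits (cs : List Char) : Int :=
  cs.foldl (fun acc c => acc * 10 + ((c.toNat : Int) - 48)) 0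

-- _chunkvals(run): int(run[:2]) on a run of digits, recursing on run[2:]
def pvChunkvals : List Char → List Int
  | [] => []
  | [a] => [pvIntOfDigits [a]]
  | a :: b :: r => pvIntOfDigits [a, b] :: pvChunkvals r

-- one iteration of B's for-loop; state = (runs, cur)
def pvRunStep (st : List (List Char) × List Char) (c : Char) : List (List Char) × List Char :=
  if PySem.Chars.isdigit c then (st.1, st.2 ++ [c])
  else if st.2 ≠ [] then (st.1 ++ [st.2], []) else st

def getinst_alt (txt : String) : List Int :=
  let rc := txt.toList.foldl pvRunStep ([], [])
  let runs := if rc.2 ≠ [] then rc.1 ++ [rc.2] else rc.1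
  let nums := runs.flatMap pvChunkvals
  (nums ++ [0, 0, 0]).take 3   -- (nums + [0,0,0])[:3] with a nonnegative bound = take 3

-- ===== PRECONDITION & SPEC =====
-- number of parsed values = one per 2-char chunk of each maximal digit run
def pvCountStep (st : Nat × Bool) (c : Char) : Nat × Bool :=
  if PySem.Chars.isdigit c then (if st.2 then (st.1, false) else (st.1 + 1, true))
  else (st.1, false)

-- Pre_ excludes strings containing four or more numbers (counting each 2-char
-- chunk of a digit run), on which A raises IndexError writing past inst[2];
-- B returns the first three values there.  (The Lean ports are totalised with
-- List.set/getD, so the proof below happens to hold even without Pre_.)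
def Pre_getinst (txt : String) : Prop :=
  (txt.toList.foldl pvCountStep (0, false)).1 ≤ 3

instance (txt : String) : Decidable (Pre_getinst txt) := by unfold Pre_getinst; infer_instance

def pvWitness_getinst : String := "move 1 from 2 to 3"

def Spec_getinst (txt : String) (out : List Int) : Prop := out = getinst_alt txt
instance (txt : String) (out : List Int) : Decidable (Spec_getinst txt out) := by unfold Spec_getinst; infer_instance

-- ===== CLAIM (what is proved, stated in full; the proofs are below) =====
def Claim_equal_getinst : Prop := ∀ (txt : String), Dom_getinst txt → Pre_getinst txt → Spec_getinst txt (getinst txt)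

-- ===== LEMMAS AND PROOFS =====

-- the list of values B has recognised in a (runs, cur) state
def pvNums (st : List (List Char) × List Char) : List Int :=
  st.1.flatMap pvChunkvals ++ pvChunkvals st.2

-- first three values, zero-padded
def pvV (ns : List Int) : List Int := [ns.getD 0 0, ns.getD 1 0, ns.getD 2 0]

-- A's state corresponding to a B state
def pvMk (st : List (List Char) × List Char) : List Int × Nat × Bool :=
  (pvV (pvNums st),
   (if st.2.length % 2 = 1 then (pvNums st).length - 1 else (pvNums st).length),
   decide (st.2.length % 2 = 1))

theorem pvChunkvals_append (u v : List Char) (h : u.length % 2 = 0) :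
    pvChunkvals (u ++ v) = pvChunkvals u ++ pvChunkvals v := by
  induction u using pvChunkvals.induct with
  | case1 => simp [pvChunkvals]
  | case2 a => simp at h
  | case3 a b r ih =>
    have hr : r.length % 2 = 0 := by simp at h; omega
    simp only [List.cons_append, pvChunkvals]
    rw [ih hr]

theorem pvChunkvals_ne_nil (u : List Char) (h : u ≠ []) : pvChunkvals u ≠ [] := by
  match u with
  | [] => exact absurd rfl h
  | [a] => simp [pvChunkvals]
  | a :: b :: r => simp [pvChunkvals]

theorem pvSet_len (ns : List Int) (d : Int) :
    (pvV ns).set ns.length d = pvV (ns ++ [d]) := by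
  match ns with
  | [] => rfl
  | [m0] => rfl
  | [m0, m1] => rfl
  | m0 :: m1 :: m2 :: r =>
    have h3 : ([m0, m1, m2] : List Int).length ≤ (m0 :: m1 :: m2 :: r).length := by
      simp
    simp [pvV, List.getD]

theorem pvSet_last (M : List Int) (x d : Int) :
    (pvV (M ++ [x])).set M.length ((pvV (M ++ [x]))[M.length]?.getD 0 * 10 + d)
      = pvV (M ++ [x * 10 + d]) := by
  match M with
  | [] => simp [pvV, List.getD]
  | [m0] => simp [pvV, List.getD]
  | [m0, m1] => simp [pvV, List.getD]
  | m0 :: m1 :: m2 :: r => simp [pvV, List.getD]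

theorem pvStep_comm (st : List (List Char) × List Char) (c : Char) :
    pvStepA (pvMk st) c = pvMk (pvRunStep st c) := by
  obtain ⟨runs, cur⟩ := st
  by_cases hd : PySem.Chars.isdigit c = true
  · by_cases hp : cur.length % 2 = 1
    · -- digit char closing a 2-char chunk
      rcases List.eq_nil_or_concat cur with hnil | ⟨pre, a, rfl⟩
      · subst hnil; simp at hp
      simp only [List.concat_eq_append] at hp ⊢
      have hpre : pre.length % 2 = 0 := by simp at hp; omega
      have h1 : pvChunkvals (pre ++ [a]) = pvChunkvals pre ++ [pvDigit a] := by
        rw [pvChunkvals_append pre [a] hpre]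
        simp [pvChunkvals, pvIntOfDigits, pvDigit]
      have h2 : pvChunkvals (pre ++ [a, c])
          = pvChunkvals pre ++ [pvDigit a * 10 + pvDigit c] := by
        rw [pvChunkvals_append pre [a, c] hpre]
        simp [pvChunkvals, pvIntOfDigits, pvDigit]
      have ha : (pre.length + 1) % 2 = 1 := by omega
      have hb : (pre.length + 1 + 1) % 2 = 0 := by omega
      simp [pvStepA, pvRunStep, pvMk, pvNums, hd, h1, h2, ha, hb]
      simp only [← List.append_assoc]
      rw [show (List.map (fun a => (pvChunkvals a).length) runs).sum
            = (List.flatMap pvChunkvals runs).length from by simp,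
          ← List.length_append, pvSet_last]
      simp
      omega
    · -- digit char opening a chunk
      have h1 : pvChunkvals (cur ++ [c]) = pvChunkvals cur ++ [pvDigit c] := by
        rw [pvChunkvals_append cur [c] (by omega)]
        simp [pvChunkvals, pvIntOfDigits, pvDigit]
      have hlen : (cur.length + 1) % 2 = 1 := by omega
      simp [pvStepA, pvRunStep, pvMk, pvNums, hd, hp, h1, hlen]
      simp only [← List.append_assoc]
      rw [show (List.map (fun a => (pvChunkvals a).length) runs).sum
            = (List.flatMap pvChunkvals runs).length from by simp,
          ← List.length_append, pvSet_len]
  · by_cases hc : cur = []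
    · subst hc; simp [pvStepA, pvMk, pvRunStep, hd]
    · have hne : pvChunkvals cur ≠ [] := pvChunkvals_ne_nil cur hc
      have he : 1 ≤ (pvChunkvals cur).length := by
        rcases List.exists_cons_of_ne_nil hne with ⟨y, ys, hy⟩
        simp [hy]
      by_cases hp : cur.length % 2 = 1 <;>
        simp [pvStepA, pvMk, pvRunStep, pvNums, hd, hc, hp, pvChunkvals] <;>
        omega

theorem pvFold_comm (cs : List Char) (st : List (List Char) × List Char) :
    cs.foldl pvStepA (pvMk st) = pvMk (cs.foldl pvRunStep st) := by
  induction cs generalizing st with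
  | nil => rfl
  | cons c cs ih => simpa [pvStep_comm] using ih (pvRunStep st c)

theorem pvTake_pad (ns : List Int) : (ns ++ [0, 0, 0]).take 3 = pvV ns := by
  match ns with
  | [] => rfl
  | [m0] => rfl
  | [m0, m1] => rfl
  | m0 :: m1 :: m2 :: r => simp [pvV, List.getD]

-- ===== VERDICT (by name: the statement is the Claim_ definition above) =====
theorem getinst_spec : Claim_equal_getinst := by
  intro txt _ _
  unfold Spec_getinst getinst getinst_alt
  have h0 : (([0, 0, 0], 0, false) : List Int × Nat × Bool) = pvMk ([], []) := rfl
  rw [h0, pvFold_comm]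
  obtain ⟨runs, cur⟩ := txt.toList.foldl pvRunStep ([], [])
  by_cases hc : cur = []
  · simp [pvMk, pvNums, pvTake_pad, hc, pvChunkvals]
  · simp [pvMk, pvNums, hc]
    simp only [← List.append_assoc]
    rw [pvTake_pad]
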